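-- pv_equiv track=rewrite | github.com/TesterNick/Battleships | python/player.py | ships_are_intersected
-- ===== SOURCE A (Python) =====
-- def ships_are_intersected(ships):
--     plain_cells = []
--     for arr in ships:
--         plain_cells.extend(arr)
--     for cell in plain_cells:
--         if plain_cells.count(cell) > 1:
--             return True
--     return False
-- ===== SOURCE B (Python) =====
-- def ships_are_intersected(ships):
--     seen = set()
--     for arr in ships:
--         for cell in arr:
--             if cell in seen:
--                 return True
--             seen.add(cell)
--     return False
-- ===== Notes on version B (the rewrite author's own statement) =====
-- stated objective: faster
-- what changed: Replaces the flatten-then-repeated-.count quadratic scan with a single nested pass that keeps a set of already-seen cells and returns True at the first repeat.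
import Mathlib
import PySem

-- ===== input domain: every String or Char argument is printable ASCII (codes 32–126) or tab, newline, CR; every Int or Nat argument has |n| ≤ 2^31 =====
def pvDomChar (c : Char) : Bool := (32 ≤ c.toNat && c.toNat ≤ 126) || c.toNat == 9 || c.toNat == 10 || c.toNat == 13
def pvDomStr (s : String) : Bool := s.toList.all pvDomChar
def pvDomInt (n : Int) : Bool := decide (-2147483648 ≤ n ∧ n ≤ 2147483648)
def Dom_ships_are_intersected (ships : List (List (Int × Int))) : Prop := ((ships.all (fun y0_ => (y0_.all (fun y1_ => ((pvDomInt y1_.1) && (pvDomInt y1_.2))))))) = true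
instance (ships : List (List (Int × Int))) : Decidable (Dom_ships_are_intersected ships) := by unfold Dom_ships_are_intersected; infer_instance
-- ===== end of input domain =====

-- B replaces A's flatten + repeated `.count` quadratic scan by a single nested pass
-- that keeps a set of already-seen cells and returns True at the first repeated cell.

-- ===== PORT A =====
-- 'for cell in plain_cells: if plain_cells.count(cell) > 1: return True'
def pvAScan (plain : List (Int × Int)) : List (Int × Int) → Bool
  | [] => false
  | c :: rest => if 1 < PySem.List.count plain c then true else pvAScan plain rest

def ships_are_intersected (ships : List (List (Int × Int))) : Bool :=
  let plain_cells := ships.foldl (fun acc arr => acc ++ arr) []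
  pvAScan plain_cells plain_cells

-- ===== PORT B =====
-- inner loop 'for cell in arr': none = returned True, some seen' = fell through
def pvBInner (seen : PySem.Set (Int × Int)) : List (Int × Int) → Option (PySem.Set (Int × Int))
  | [] => some seen
  | c :: rest => if seen.contains c then none else pvBInner (seen.add c) rest

def pvBOuter (seen : PySem.Set (Int × Int)) : List (List (Int × Int)) → Bool
  | [] => false
  | arr :: rest =>
    match pvBInner seen arr with
    | none => true
    | some seen' => pvBOuter seen' rest

def ships_are_intersected_alt (ships : List (List (Int × Int))) : Bool :=
  pvBOuter PySem.Set.empty ships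

-- ===== PRECONDITION & SPEC =====
def Spec_ships_are_intersected (ships : List (List (Int × Int))) (out : Bool) : Prop := out = ships_are_intersected_alt ships
instance (ships : List (List (Int × Int))) (out : Bool) : Decidable (Spec_ships_are_intersected ships out) := by unfold Spec_ships_are_intersected; infer_instance

-- ===== CLAIM (what is proved, stated in full; the proofs are below) =====
def Claim_equal_ships_are_intersected : Prop := ∀ (ships : List (List (Int × Int))), Dom_ships_are_intersected ships → Spec_ships_are_intersected ships (ships_are_intersected ships)

-- ===== LEMMAS AND PROOFS =====

lemma pvAScan_true_iff (plain l : List (Int × Int)) :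
    pvAScan plain l = true ↔ ∃ c ∈ l, 1 < PySem.List.count plain c := by
  induction l with
  | nil => simp [pvAScan]
  | cons c rest ih =>
    by_cases h : 1 < PySem.List.count plain c
    · simp only [pvAScan, if_pos h]
      exact iff_of_true trivial ⟨c, by simp, h⟩
    · simp only [pvAScan, if_neg h, ih]
      constructor
      · rintro ⟨x, hx, h2⟩; exact ⟨x, by simp [hx], h2⟩
      · rintro ⟨x, hx, h2⟩
        rcases List.mem_cons.mp hx with rfl | hx
        · exact absurd h2 h
        · exact ⟨x, hx, h2⟩

-- A returns true exactly when the flattened cell list has a duplicate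
lemma portA_true_iff (ships : List (List (Int × Int))) :
    ships_are_intersected ships = true ↔ ¬ ships.flatten.Nodup := by
  unfold ships_are_intersected
  rw [PySem.List.foldl_append_eq_flatMap (fun arr => arr) ships []]
  simp only [List.nil_append, List.flatMap_id']
  rw [pvAScan_true_iff, List.nodup_iff_count_le_one]
  simp only [PySem.List.count_eq]
  constructor
  · rintro ⟨c, _, h⟩ hall
    exact absurd (hall c) (by omega)
  · intro h
    push Not at h
    obtain ⟨a, ha⟩ := h
    exact ⟨a, List.count_pos_iff.mp (by omega), by omega⟩

-- (seen ++ X).Nodup depends on seen only through its membership, given seen nodup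
lemma pvNodupAppend_congr (s t X : List (Int × Int)) (hs : s.Nodup) (ht : t.Nodup)
    (hmem : ∀ x, x ∈ s ↔ x ∈ t) : (s ++ X).Nodup ↔ (t ++ X).Nodup := by
  rw [List.nodup_append, List.nodup_append]
  simp only [hs, ht, true_and]
  constructor <;> rintro ⟨h1, h2⟩
  · exact ⟨h1, fun a ha b hb => h2 a ((hmem a).mpr ha) b hb⟩
  · exact ⟨h1, fun a ha b hb => h2 a ((hmem a).mp ha) b hb⟩

lemma pvBInner_spec (arr : List (Int × Int)) :
    ∀ (seen : PySem.Set (Int × Int)), (seen : List (Int × Int)).Nodup →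
      ((pvBInner seen arr = none → ¬ ((seen : List (Int × Int)) ++ arr).Nodup) ∧
       (∀ s', pvBInner seen arr = some s' →
          (s' : List (Int × Int)).Nodup ∧
          (∀ x, x ∈ (s' : List (Int × Int)) ↔ x ∈ (seen : List (Int × Int)) ∨ x ∈ arr) ∧
          ((seen : List (Int × Int)) ++ arr).Nodup)) := by
  induction arr with
  | nil =>
    intro seen hs
    refine ⟨by simp [pvBInner], ?_⟩
    intro s' hsome
    simp only [pvBInner, Option.some.injEq] at hsome
    subst hsome
    exact ⟨hs, by simp, by simpa using hs⟩
  | cons c rest ih =>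
    intro seen hs
    by_cases hmem : c ∈ (seen : List (Int × Int))
    · refine ⟨?_, ?_⟩
      · intro _ hnd
        exact (List.disjoint_of_nodup_append hnd) hmem (by simp)
      · intro s' hsome
        simp [pvBInner, hmem] at hsome
    · have hadd : seen.add c = (seen : List (Int × Int)) ++ [c] := by
        simp [PySem.Set.add, hmem]
      have heq : ((seen.add c : List (Int × Int))) ++ rest = (seen : List (Int × Int)) ++ c :: rest := by
        rw [hadd, List.append_assoc]; rfl
      have hsadd : ((seen.add c : List (Int × Int))).Nodup := PySem.Set.nodup_add seen c hs
      obtain ⟨hnone, hsome⟩ := ih (seen.add c) hsadd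
      refine ⟨?_, ?_⟩
      · intro h hnd
        have h' : pvBInner (seen.add c) rest = none := by simpa [pvBInner, hmem] using h
        rw [← heq] at hnd
        exact hnone h' hnd
      · intro s' h
        have h' : pvBInner (seen.add c) rest = some s' := by simpa [pvBInner, hmem] using h
        obtain ⟨h1, h2, h3⟩ := hsome s' h'
        rw [heq] at h3
        refine ⟨h1, ?_, h3⟩
        intro x
        rw [h2 x, hadd]
        simp
        tauto

lemma pvBOuter_true_iff (ships : List (List (Int × Int))) :
    ∀ (seen : PySem.Set (Int × Int)), (seen : List (Int × Int)).Nodup →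
      (pvBOuter seen ships = true ↔ ¬ ((seen : List (Int × Int)) ++ ships.flatten).Nodup) := by
  induction ships with
  | nil =>
    intro seen hs
    simp [pvBOuter, hs]
  | cons arr rest ih =>
    intro seen hs
    obtain ⟨hnone, hsome⟩ := pvBInner_spec arr seen hs
    cases hinner : pvBInner seen arr with
    | none =>
      simp only [pvBOuter, hinner]
      refine iff_of_true trivial ?_
      intro hnd
      have hsub : ((seen : List (Int × Int)) ++ arr).Sublist ((seen : List (Int × Int)) ++ (arr :: rest).flatten) := by
        rw [List.flatten_cons]
        exact (List.sublist_append_left arr rest.flatten).append_left _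
      exact hnone hinner (hsub.nodup hnd)
    | some seen' =>
      obtain ⟨h1, h2, h3⟩ := hsome seen' hinner
      simp only [pvBOuter, hinner]
      rw [ih seen' h1]
      have hcong := pvNodupAppend_congr (seen' : List (Int × Int)) ((seen : List (Int × Int)) ++ arr)
        rest.flatten h1 h3 (fun x => by rw [h2 x]; simp)
      have heq : ((seen : List (Int × Int)) ++ arr) ++ rest.flatten = (seen : List (Int × Int)) ++ (arr :: rest).flatten := by
        rw [List.flatten_cons, List.append_assoc]
      rw [heq] at hcong
      exact not_congr hcong

lemma portB_true_iff (ships : List (List (Int × Int))) :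
    ships_are_intersected_alt ships = true ↔ ¬ ships.flatten.Nodup := by
  unfold ships_are_intersected_alt
  have h := pvBOuter_true_iff ships PySem.Set.empty (by simp [PySem.Set.empty])
  simpa [PySem.Set.empty] using h

-- ===== VERDICT (by name: the statement is the Claim_ definition above) =====
theorem ships_are_intersected_spec : Claim_equal_ships_are_intersected := by
  intro ships _
  unfold Spec_ships_are_intersected
  rw [Bool.eq_iff_iff, portA_true_iff, portB_true_iff]
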